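-- pv_equiv track=rewrite | github.com/12seetharaman/temp | problem02.py | get_short_time
-- ===== SOURCE A (Python) =====
-- def get_short_time(m_dict, member, follows, path=[], time=0, durations=[]):
--     path = path + [member]
--     if follows in m_dict[member].keys():
--         durations.append(time + m_dict[member][follows])
--
--     for i in m_dict[member]:
--         if i not in path:
--             time = time + m_dict[member][i]
--             durations = get_short_time(m_dict, i, follows, path, time, durations)
--     return durations
-- ===== SOURCE B (Python) =====
-- def get_short_time(m_dict, member, follows, path=[], time=0, durations=[]):
--     # Pure decomposition: _collect returns the list of durations this traversal
--     # contributes; get_short_time extends the passed (possibly shared-default)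
--     # durations list with them and returns it.
--     durations.extend(_collect(m_dict, member, follows, path, time))
--     return durations
--
-- def _collect(m_dict, member, follows, path, time):
--     path = path + [member]
--     adj = m_dict[member]
--     out = [time + adj[follows]] if follows in adj else []
--     for i in adj:
--         if i not in path:
--             time = time + adj[i]
--             out = out + _collect(m_dict, i, follows, path, time)
--     return out
-- ===== Notes on version B (the rewrite author's own statement) =====
-- stated objective: simpler
-- what changed: A threads a mutable durations accumulator through the recursion and appends mid-traversal; B is a pure recursion that returns each subtree's list of contributed durations and concatenates them (same sibling time accumulation and visit order), with one final extend of the passed list.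
import Mathlib
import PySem

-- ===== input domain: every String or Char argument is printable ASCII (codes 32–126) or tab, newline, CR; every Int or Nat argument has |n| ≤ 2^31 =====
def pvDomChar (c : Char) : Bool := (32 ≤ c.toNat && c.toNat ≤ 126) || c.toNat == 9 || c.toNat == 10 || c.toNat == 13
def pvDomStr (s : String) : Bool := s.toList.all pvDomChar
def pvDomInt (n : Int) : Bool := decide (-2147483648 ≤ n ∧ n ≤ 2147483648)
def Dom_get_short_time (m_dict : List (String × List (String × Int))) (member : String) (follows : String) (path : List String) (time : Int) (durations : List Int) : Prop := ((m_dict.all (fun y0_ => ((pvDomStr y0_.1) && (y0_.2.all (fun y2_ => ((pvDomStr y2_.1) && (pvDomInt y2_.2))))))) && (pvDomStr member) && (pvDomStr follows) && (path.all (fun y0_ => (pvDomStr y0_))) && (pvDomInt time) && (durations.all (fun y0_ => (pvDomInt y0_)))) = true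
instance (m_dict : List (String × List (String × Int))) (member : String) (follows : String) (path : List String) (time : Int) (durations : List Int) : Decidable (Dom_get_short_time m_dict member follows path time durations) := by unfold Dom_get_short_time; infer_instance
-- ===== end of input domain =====

-- B replaces A's accumulator-threaded mutating DFS by a pure recursion that returns each
-- subtree's contributed durations and concatenates them, then extends the passed list once:
-- a simpler, pure decomposition (same visit order and sibling time accumulation), not faster.
-- Both Pythons leave the passed `durations` list with the same final contents; the
-- equivalence proved here is about the return value.

-- ===== PORT A =====
-- termination measures for A's DFS (used only in termination_by/decreasing_by)
def pvNu (m_dict : List (String × List (String × Int))) (path : List String) : Nat :=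
  ((m_dict.map Prod.fst).dedup.filter (fun k => decide (k ∉ path))).length

def pvMu (m_dict : List (String × List (String × Int))) (member : String) (path : List String) : Nat :=
  pvNu m_dict path + (if member ∈ path then 1 else 0)

theorem pv_mem_of_lookup {α : Type} (l : List (String × α)) (k : String) (v : α)
    (h : l.lookup k = some v) : (k, v) ∈ l := by
  induction l with
  | nil => simp [List.lookup] at h
  | cons p r ih =>
    cases p with
    | mk a b =>
      by_cases hk : k = a
      · subst hk
        simp [List.lookup] at h
        simp [h]
      · have hkb : (k == a) = false := beq_false_of_ne hk
        simp [List.lookup, hkb] at h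
        exact List.mem_cons_of_mem _ (ih h)

theorem pv_filter_le (l : List String) (p q : String → Bool)
    (hpq : ∀ x, q x = true → p x = true) :
    (l.filter q).length ≤ (l.filter p).length := by
  induction l with
  | nil => simp
  | cons a r ih =>
    by_cases hqa : q a = true
    · simp [hqa, hpq a hqa]; omega
    · simp only [List.filter_cons, hqa, if_neg, Bool.false_eq_true, not_false_iff]
      by_cases hpa : p a = true <;> simp [hpa] <;> omega

theorem pv_filter_lt (l : List String) (p q : String → Bool)
    (hpq : ∀ x, q x = true → p x = true) (x : String) (hx : x ∈ l)
    (hp : p x = true) (hq : q x = false) :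
    (l.filter q).length < (l.filter p).length := by
  induction l with
  | nil => simp at hx
  | cons a r ih =>
    by_cases hax : a = x
    · subst hax
      simp only [List.filter_cons, hp, hq, if_pos, Bool.false_eq_true, if_neg,
        not_false_iff, List.length_cons]
      have := pv_filter_le r p q hpq
      omega
    · have hxr : x ∈ r := by
        rcases List.mem_cons.mp hx with h1 | h1
        · exact absurd h1.symm hax
        · exact h1
      have h' := ih hxr
      simp only [List.filter_cons]
      by_cases hqa : q a = true
      · simp [hqa, hpq a hqa]; omega
      · simp only [hqa, if_neg, Bool.false_eq_true, not_false_iff]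
        by_cases hpa : p a = true <;> simp [hpa] <;> omega

-- the key decrease fact: visiting a present member strictly shrinks A's measure
theorem pv_nu_lt (m_dict : List (String × List (String × Int))) (member : String)
    (path : List String) (adj : List (String × Int))
    (h : m_dict.lookup member = some adj) :
    pvNu m_dict (path ++ [member]) < pvMu m_dict member path := by
  have hmem : member ∈ (m_dict.map Prod.fst).dedup := by
    rw [List.mem_dedup, List.mem_map]
    exact ⟨(member, adj), pv_mem_of_lookup _ _ _ h, rfl⟩
  unfold pvMu pvNu
  by_cases hp : member ∈ path
  · have heq : ((m_dict.map Prod.fst).dedup.filter (fun k => decide (k ∉ path ++ [member]))) =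
        ((m_dict.map Prod.fst).dedup.filter (fun k => decide (k ∉ path))) := by
      apply List.filter_congr
      intro k _
      apply decide_eq_decide.mpr
      simp only [List.mem_append, List.mem_singleton, not_or]
      constructor
      · rintro ⟨h1, _⟩; exact h1
      · intro h1; exact ⟨h1, fun he => h1 (he ▸ hp)⟩
    rw [heq]
    simp [hp]
  · have hlt : ((m_dict.map Prod.fst).dedup.filter (fun k => decide (k ∉ path ++ [member]))).length <
        ((m_dict.map Prod.fst).dedup.filter (fun k => decide (k ∉ path))).length := by
      apply pv_filter_lt _ _ _ ?_ member hmem ?_ ?_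
      · intro x hx
        simp only [decide_eq_true_eq, List.mem_append, List.mem_singleton, not_or] at hx ⊢
        exact hx.1
      · exact decide_eq_true hp
      · simp
    simp only [hp, if_neg, not_false_iff]
    omega

mutual
def get_short_time (m_dict : List (String × List (String × Int))) (member : String) (follows : String) (path : List String) (time : Int) (durations : List Int) : List Int :=
  let path2 := path ++ [member]                           -- path = path + [member]
  match h : m_dict.lookup member with                     -- m_dict[member]  (KeyError excluded by Pre_)
  | none => durations
  | some adj =>
    let durations2 :=
      match adj.lookup follows with                       -- if follows in m_dict[member].keys(): append
      | some w => durations ++ [time + w]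
      | none => durations
    goA_list m_dict follows adj adj path2 time durations2 -- for i in m_dict[member]: …

termination_by (pvMu m_dict member path, 1, 0)
decreasing_by
  exact Prod.Lex.left _ _ (pv_nu_lt m_dict member path adj h)

def goA_list (m_dict : List (String × List (String × Int))) (follows : String)
    (adjFull : List (String × Int)) (rest : List (String × Int))
    (path2 : List String) (time : Int) (durations : List Int) : List Int :=
  match rest with
  | [] => durations
  | (i, _w) :: r =>
    if hi : i ∈ path2 then goA_list m_dict follows adjFull r path2 time durations
    else
      let time2 := time + ((adjFull.lookup i).getD 0)     -- time = time + m_dict[member][i]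
      let durations2 := get_short_time m_dict i follows path2 time2 durations
      goA_list m_dict follows adjFull r path2 time2 durations2

termination_by (pvNu m_dict path2, 2, rest.length)
decreasing_by
  · exact Prod.Lex.right _ (Prod.Lex.right _ (by simp))
  · exact Prod.Lex.right' _ (by simp [pvMu, hi]) (Prod.Lex.left _ _ (by omega))
  · exact Prod.Lex.right _ (Prod.Lex.right _ (by simp))
end

-- ===== PORT B =====
-- Source B's pure helper _collect: the durations this subtree contributes, as a value.
-- The fuel argument only makes the recursion structural (never exhausted under Pre_,
-- where the recursion depth is at most the number of keys of m_dict plus one).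
mutual
def pvCollect (fuel : Nat) (m_dict : List (String × List (String × Int)))
    (member : String) (follows : String) (path : List String) (time : Int) : List Int :=
  match fuel with
  | 0 => []
  | f + 1 =>
    let path2 := path ++ [member]                         -- path = path + [member]
    match m_dict.lookup member with                       -- adj = m_dict[member]
    | none => []
    | some adj =>
      (match adj.lookup follows with                      -- [time + adj[follows]] if follows in adj else []
       | some w => [time + w]
       | none => []) ++ pvCollectLoop f m_dict follows adj adj path2 time

def pvCollectLoop (f : Nat) (m_dict : List (String × List (String × Int)))
    (follows : String) (adjFull : List (String × Int)) (rest : List (String × Int))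
    (path2 : List String) (time : Int) : List Int :=
  match rest with
  | [] => []
  | (i, _w) :: r =>
    if i ∈ path2 then pvCollectLoop f m_dict follows adjFull r path2 time
    else
      let time2 := time + ((adjFull.lookup i).getD 0)     -- time = time + adj[i]
      pvCollect f m_dict i follows path2 time2 ++         -- out = out + _collect(…)
        pvCollectLoop f m_dict follows adjFull r path2 time2
end

def get_short_time_alt (m_dict : List (String × List (String × Int))) (member : String) (follows : String) (path : List String) (time : Int) (durations : List Int) : List Int :=
  durations ++ pvCollect (m_dict.length + 1) m_dict member follows path time
  -- durations.extend(_collect(…)); return durations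

-- ===== PRECONDITION & SPEC =====
-- the set of members the DFS actually visits: member plus everything reachable from it
-- through neighbours not blocked by the initial path
def pvReachStep (m_dict : List (String × List (String × Int))) (path0 : List String)
    (R : List String) : List String :=
  m_dict.foldl (fun acc p =>
    if p.1 ∈ R then
      p.2.foldl (fun acc2 q => if q.1 ∈ path0 ∨ q.1 ∈ acc2 then acc2 else acc2 ++ [q.1]) acc
    else acc) R

def pvReach (m_dict : List (String × List (String × Int))) (member : String)
    (path0 : List String) : List String :=
  (List.range (m_dict.length + 1)).foldl (fun R _ => pvReachStep m_dict path0 R) [member]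

-- Pre_ excludes inputs on which the Python raises KeyError (the start member, or a neighbour
-- the walk actually reaches, missing from m_dict) and association lists with duplicate outer
-- or inner keys, which have no faithful counterpart as a Python dict (duplicate keys collapse).
def Pre_get_short_time (m_dict : List (String × List (String × Int))) (member : String) (follows : String) (path : List String) (time : Int) (durations : List Int) : Prop :=
  (m_dict.map Prod.fst).Nodup ∧
  (∀ p ∈ m_dict, (p.2.map Prod.fst).Nodup) ∧
  ∀ r ∈ pvReach m_dict member path, r ∈ m_dict.map Prod.fst
instance (m_dict : List (String × List (String × Int))) (member : String) (follows : String) (path : List String) (time : Int) (durations : List Int) : Decidable (Pre_get_short_time m_dict member follows path time durations) := by unfold Pre_get_short_time; infer_instance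

def pvWitness_get_short_time : (List (String × List (String × Int))) × String × String × List String × Int × List Int :=
  ([("a", [("b", 3)]), ("b", [])], "a", "b", [], 0, [])

def Spec_get_short_time (m_dict : List (String × List (String × Int))) (member : String) (follows : String) (path : List String) (time : Int) (durations : List Int) (out : List Int) : Prop := out = get_short_time_alt m_dict member follows path time durations
instance (m_dict : List (String × List (String × Int))) (member : String) (follows : String) (path : List String) (time : Int) (durations : List Int) (out : List Int) : Decidable (Spec_get_short_time m_dict member follows path time durations out) := by unfold Spec_get_short_time; infer_instance

-- ===== CLAIM (what is proved, stated in full; the proofs are below) =====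
def Claim_equal_get_short_time : Prop := ∀ (m_dict : List (String × List (String × Int))) (member : String) (follows : String) (path : List String) (time : Int) (durations : List Int), Dom_get_short_time m_dict member follows path time durations → Pre_get_short_time m_dict member follows path time durations → Spec_get_short_time m_dict member follows path time durations (get_short_time m_dict member follows path time durations)

-- ===== LEMMAS AND PROOFS =====

-- enough fuel makes B's pure collection agree with A's accumulator threading
theorem pv_collect_eq (fuel : Nat) (m_dict : List (String × List (String × Int))) (follows : String) :
    ∀ (member : String) (path : List String) (time : Int) (durations : List Int),
      pvMu m_dict member path ≤ fuel →
      get_short_time m_dict member follows path time durations =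
        durations ++ pvCollect fuel m_dict member follows path time := by
  induction fuel with
  | zero =>
    intro member path time durations hμ
    rw [get_short_time, pvCollect]
    cases h : m_dict.lookup member with
    | none => simp
    | some adj =>
      exact absurd (pv_nu_lt m_dict member path adj h) (by omega)
  | succ f ih =>
    intro member path time durations hμ
    rw [get_short_time, pvCollect]
    cases h : m_dict.lookup member with
    | none => simp
    | some adj =>
      have hν : pvNu m_dict (path ++ [member]) ≤ f := by
        have := pv_nu_lt m_dict member path adj h; omega
      simp only
      suffices hloop : ∀ (sub : List (String × Int)) (time : Int) (d : List Int),
          goA_list m_dict follows adj sub (path ++ [member]) time d =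
            d ++ pvCollectLoop f m_dict follows adj sub (path ++ [member]) time by
        cases adj.lookup follows with
        | none => simp [hloop adj time durations]
        | some w => simp [hloop adj time (durations ++ [time + w])]
      intro sub
      induction sub with
      | nil => intro time d; rw [goA_list, pvCollectLoop]; simp
      | cons p r ihr =>
        intro time d
        cases p with
        | mk i w =>
          rw [goA_list, pvCollectLoop]
          by_cases hi : i ∈ path ++ [member]
          · simp only [hi, if_pos, dif_pos]; exact ihr time d
          · simp only [hi, if_neg, dif_neg, not_false_iff]
            rw [ih i (path ++ [member]) _ d (by simp [pvMu, hi]; omega)]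
            rw [ihr]
            simp [List.append_assoc]

theorem pv_mu_le (m_dict : List (String × List (String × Int))) (member : String)
    (path : List String) : pvMu m_dict member path ≤ m_dict.length + 1 := by
  have h1 : pvNu m_dict path ≤ (m_dict.map Prod.fst).dedup.length :=
    List.length_filter_le _ _
  have h2 : (m_dict.map Prod.fst).dedup.length ≤ (m_dict.map Prod.fst).length :=
    (m_dict.map Prod.fst).dedup_sublist.length_le
  have h3 : (m_dict.map Prod.fst).length = m_dict.length := List.length_map ..
  unfold pvMu
  by_cases hp : member ∈ path <;> simp [hp] <;> omega

-- ===== VERDICT (by name: the statement is the Claim_ definition above) =====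
theorem get_short_time_spec : Claim_equal_get_short_time := by
  intro m_dict member follows path time durations _ _
  unfold Spec_get_short_time get_short_time_alt
  exact pv_collect_eq (m_dict.length + 1) m_dict follows member path time durations
    (pv_mu_le m_dict member path)
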